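-- pv_equiv track=rewrite | github.com/cabaleirog/coding-challenges | codeforces/mentors.py | solve
-- ===== SOURCE A (Python) =====
-- from collections import defaultdict
--
-- def solve(skills, quarrels):
--     ans = [0] * len(skills)
--
--     skills_mapping = defaultdict(list)
--     for i, skill in enumerate(skills):
--         skills_mapping[skill].append(i)
--
--     quarrels_mapping = defaultdict(int)
--     for i, j in quarrels:
--         if skills[i - 1] == skills[j - 1]:
--             continue
--         elif skills[i - 1] < skills[j - 1]:
--             i, j = j, i
--         quarrels_mapping[i - 1] += 1
--
--     tmp = len(skills)
--     for skill in sorted(set(skills), reverse=True):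
--         group_size = len(skills_mapping[skill])
--         for i in skills_mapping[skill]:
--             ans[i] = max(0, tmp - quarrels_mapping[i] - group_size)
--         tmp -= group_size
--
--     return ans
-- ===== SOURCE B (Python) =====
-- def solve(skills, quarrels):
--     rank = {}
--     for idx, s in enumerate(sorted(skills)):
--         rank.setdefault(s, idx)
--     q = {}
--     for a, b in quarrels:
--         sa, sb = skills[a - 1], skills[b - 1]
--         if sb < sa:
--             q[a - 1] = q.get(a - 1, 0) + 1
--         elif sa < sb:
--             q[b - 1] = q.get(b - 1, 0) + 1
--     return [max(0, rank[s] - q.get(i, 0)) for i, s in enumerate(skills)]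
-- ===== Notes on version B (the rewrite author's own statement) =====
-- stated objective: simpler
-- what changed: A's defaultdict of index groups swept in descending skill order with a running suffix-size counter is replaced by a one-shot first-occurrence rank dict over the ascending sorted list (rank[s] = count of strictly smaller skills) and a direct per-index comprehension ans[i] = max(0, rank[skills[i]] - quarrel_count[i]).
import Mathlib
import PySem

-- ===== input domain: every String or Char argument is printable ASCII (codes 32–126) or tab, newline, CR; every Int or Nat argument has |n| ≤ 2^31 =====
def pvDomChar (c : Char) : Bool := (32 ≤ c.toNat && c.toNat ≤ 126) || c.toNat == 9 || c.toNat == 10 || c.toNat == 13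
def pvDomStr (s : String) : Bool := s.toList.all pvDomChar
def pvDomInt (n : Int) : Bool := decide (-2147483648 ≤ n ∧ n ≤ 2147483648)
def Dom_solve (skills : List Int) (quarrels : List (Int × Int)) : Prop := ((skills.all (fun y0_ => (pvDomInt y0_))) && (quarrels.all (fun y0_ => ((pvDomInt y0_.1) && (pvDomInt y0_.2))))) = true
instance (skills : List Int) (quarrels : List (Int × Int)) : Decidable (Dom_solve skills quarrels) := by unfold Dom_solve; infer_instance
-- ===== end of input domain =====

-- B replaces A's grouped descending sweep (defaultdict of index groups plus a running
-- suffix-size counter) by a first-occurrence rank dict over the ascending sorted list and a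
-- direct per-index map; objective: simpler.

-- ===== PORT A =====
-- skills_mapping: defaultdict(list); skills_mapping[skill].append(i)
def pvSM (skills : List Int) : PySem.Dict Int (List Int) :=
  (PySem.List.enumerate skills).foldl (fun d p => d.modify p.2 [] (· ++ [p.1])) PySem.Dict.empty

-- quarrels_mapping: defaultdict(int); eq → skip, swap so the larger endpoint is charged
-- (skills[i-1] read with PySem.List.pyGet?; the .getD 0 is only reached outside Pre_solve)
def pvQM (skills : List Int) (quarrels : List (Int × Int)) : PySem.Dict Int Int :=
  quarrels.foldl (fun d p =>
    let si := (PySem.List.pyGet? skills (p.1 - 1)).getD 0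
    let sj := (PySem.List.pyGet? skills (p.2 - 1)).getD 0
    if si = sj then d
    else if si < sj then d.insert (p.2 - 1) (d.getD (p.2 - 1) 0 + 1)
    else d.insert (p.1 - 1) (d.getD (p.1 - 1) 0 + 1)) PySem.Dict.empty

-- body of 'for skill in sorted(set(skills), reverse=True)': st = (ans, tmp)
def pvStep (skills : List Int) (quarrels : List (Int × Int)) (st : List Int × Int) (skill : Int) :
    List Int × Int :=
  let group := (pvSM skills).getD skill []
  let gsize : Int := group.length
  (group.foldl
     (fun a i => PySem.List.pySetD a i (max 0 (st.2 - (pvQM skills quarrels).getD i 0 - gsize)))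
     st.1,
   st.2 - gsize)

def solve (skills : List Int) (quarrels : List (Int × Int)) : List Int :=
  ((PySem.List.sorted (PySem.Set.ofList skills) (fun x => x) true).foldl
      (pvStep skills quarrels)
      (List.replicate skills.length 0, (skills.length : Int))).1

-- ===== PORT B =====
-- rank[s] = first-occurrence index of s in sorted(skills)  (rank.setdefault(s, idx))
def pvRank (skills : List Int) : PySem.Dict Int Int :=
  (PySem.List.enumerate (PySem.List.sorted skills (fun x => x) false)).foldl
    (fun d p => d.setdefault p.2 p.1) PySem.Dict.empty

-- q: charge the strictly larger endpoint of each quarrel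
def pvQB (skills : List Int) (quarrels : List (Int × Int)) : PySem.Dict Int Int :=
  quarrels.foldl (fun d p =>
    let sa := (PySem.List.pyGet? skills (p.1 - 1)).getD 0
    let sb := (PySem.List.pyGet? skills (p.2 - 1)).getD 0
    if sb < sa then d.insert (p.1 - 1) (d.getD (p.1 - 1) 0 + 1)
    else if sa < sb then d.insert (p.2 - 1) (d.getD (p.2 - 1) 0 + 1)
    else d) PySem.Dict.empty

-- rank[s] in Source B cannot miss (every skill is a key); the .getD default 0 is never used
def solve_alt (skills : List Int) (quarrels : List (Int × Int)) : List Int :=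
  (PySem.List.enumerate skills).map
    (fun p => max 0 ((pvRank skills).getD p.2 0 - (pvQB skills quarrels).getD p.1 0))

-- ===== PRECONDITION & SPEC =====
-- Pre_ excludes exactly the inputs where Python A raises IndexError: a quarrel endpoint i
-- with i-1 outside Python's (negative-wrapping) index range of skills.
def Pre_solve (skills : List Int) (quarrels : List (Int × Int)) : Prop :=
  ∀ p ∈ quarrels, PySem.Raise.InRange skills.length (p.1 - 1) ∧
    PySem.Raise.InRange skills.length (p.2 - 1)
instance (skills : List Int) (quarrels : List (Int × Int)) : Decidable (Pre_solve skills quarrels) := by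
  unfold Pre_solve; infer_instance
def pvWitness_solve : List Int × (List (Int × Int)) := ([4, 1, 4, 2], [(1, 2), (3, 4)])

def Spec_solve (skills : List Int) (quarrels : List (Int × Int)) (out : List Int) : Prop := out = solve_alt skills quarrels
instance (skills : List Int) (quarrels : List (Int × Int)) (out : List Int) : Decidable (Spec_solve skills quarrels out) := by unfold Spec_solve; infer_instance

-- ===== CLAIM (what is proved, stated in full; the proofs are below) =====
def Claim_equal_solve : Prop := ∀ (skills : List Int) (quarrels : List (Int × Int)), Dom_solve skills quarrels → Pre_solve skills quarrels → Spec_solve skills quarrels (solve skills quarrels)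

-- ===== LEMMAS AND PROOFS =====

-- the indices of skills holding value v, in order (what A's skills_mapping[v] holds)
def pvIdxs (skills : List Int) (v : Int) : List Int :=
  ((PySem.List.enumerate skills).filter (fun p => p.2 == v)).map (·.1)

-- sum, over the values of ds that are > u, of their multiplicity in skills
def pvS (skills : List Int) (ds : List Int) (u : Int) : Int :=
  ((ds.filter (fun w => decide (u < w))).map (fun w => (skills.count w : Int))).sum

theorem pvQM_eq_pvQB (skills : List Int) (quarrels : List (Int × Int)) :
    pvQM skills quarrels = pvQB skills quarrels := by

  unfold pvQM pvQB
  congr 1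
  funext d p
  dsimp only
  split_ifs <;> first | rfl | omega


theorem pvSM_getD (skills : List Int) (v : Int) :
    (pvSM skills).getD v [] = pvIdxs skills v := by

  unfold pvSM pvIdxs
  have h1 : (PySem.List.enumerate skills).foldl
       (fun (d : PySem.Dict Int (List Int)) (p : Int × Int) => d.modify p.2 [] (· ++ [p.1]))
       PySem.Dict.empty
      = ((PySem.List.enumerate skills).map Prod.swap).foldl
       (fun (d : PySem.Dict Int (List Int)) (p : Int × Int) => d.modify p.1 [] (· ++ [p.2]))
       PySem.Dict.empty := by
    rw [List.foldl_map]
    rfl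
  rw [h1, PySem.Dict.getD_foldl_modify_append]
  simp [List.filter_map, List.map_map, Function.comp_def, Prod.swap]

theorem pvIdxs_len (skills : List Int) (v : Int) :
    (pvIdxs skills v).length = skills.count v := by

  unfold pvIdxs
  rw [List.length_map, ← List.countP_eq_length_filter]
  have h : (fun (p : Int × Int) => p.2 == v) = (fun (x : Int) => x == v) ∘ (fun (p : Int × Int) => p.2) := rfl
  rw [h, ← List.countP_map, PySem.List.map_snd_enumerate]
  rfl

theorem pvIdxs_bounds (skills : List Int) (v : Int) :
    ∀ i ∈ pvIdxs skills v, 0 ≤ i ∧ i < (skills.length : Int) := by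

  intro i hi
  unfold pvIdxs at hi
  simp only [List.mem_map, List.mem_filter, PySem.List.mem_enumerate_iff] at hi
  obtain ⟨p, ⟨⟨kk, hkk, rfl⟩, -⟩, rfl⟩ := hi
  simp
  omega


theorem pvIdxs_mem (skills : List Int) (v : Int) (k : Nat) (hk : k < skills.length) :
    ((k : Int) ∈ pvIdxs skills v) ↔ skills[k] = v := by

  unfold pvIdxs
  simp only [List.mem_map, List.mem_filter, PySem.List.mem_enumerate_iff]
  constructor
  · rintro ⟨p, ⟨⟨kk, hkk, rfl⟩, hv⟩, hk1⟩
    simp at hv hk1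
    have : kk = k := by omega
    subst this
    exact hv
  · intro hv
    exact ⟨((k : Int), skills[k]), ⟨⟨k, hk, by simp⟩, by simpa using hv⟩, rfl⟩


theorem pySetD_eq_set (a : List Int) (i : Int) (v : Int) (h0 : 0 ≤ i) (h1 : i < (a.length : Int)) :
    PySem.List.pySetD a i v = a.set i.toNat v := by

  obtain ⟨m, rfl⟩ := Int.eq_ofNat_of_zero_le h0
  have hm : m < a.length := by exact_mod_cast h1
  simp [PySem.List.pySetD, PySem.List.pySet?_natCast a m v hm]

theorem foldl_setD_length (g : List Int) (val : Int → Int) (a : List Int)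
    (hg : ∀ i ∈ g, 0 ≤ i ∧ i < (a.length : Int)) :
    (g.foldl (fun a i => PySem.List.pySetD a i (val i)) a).length = a.length := by

  induction g generalizing a with
  | nil => rfl
  | cons i g ih =>
    obtain ⟨h0, h1⟩ := hg i (by simp)
    rw [List.foldl_cons, pySetD_eq_set _ _ _ h0 h1]
    rw [ih (a.set i.toNat (val i)) (by intro j hj; simpa using hg j (List.mem_cons_of_mem _ hj))]
    simp


theorem foldl_setD_getElem? (g : List Int) (val : Int → Int) (a : List Int)
    (hg : ∀ i ∈ g, 0 ≤ i ∧ i < (a.length : Int)) (k : Nat) :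
    (g.foldl (fun a i => PySem.List.pySetD a i (val i)) a)[k]? =
      if ((k : Int) ∈ g) then some (val k) else a[k]? := by

  induction g generalizing a with
  | nil => simp
  | cons i g ih =>
    obtain ⟨h0, h1⟩ := hg i (by simp)
    rw [List.foldl_cons, pySetD_eq_set _ _ _ h0 h1]
    rw [ih (a.set i.toNat (val i)) (by intro j hj; simpa using hg j (List.mem_cons_of_mem _ hj))]
    by_cases hkg : ((k : Int) ∈ g)
    · simp [hkg]
    · by_cases hki : ((k : Int) = i)
      · have hkl : k < a.length := by omega
        have : i.toNat = k := by omega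
        simp [hkg, hkl, ← hki]
      · have : i.toNat ≠ k := by omega
        simp [hkg, hki, this]


theorem foldl_setdefault_get? (l : List (Int × Int)) (v : Int) :
    ∀ d : PySem.Dict Int Int,
      ((l.foldl (fun d p => d.setdefault p.2 p.1) d).get? v) =
        (d.get? v).or ((l.find? (fun p => p.2 == v)).map (·.1)) := by

  induction l with
  | nil => intro d; simp
  | cons p l ih =>
    intro d
    rw [List.foldl_cons, ih]
    by_cases hp : p.2 = v
    · rw [List.find?_cons_of_pos (by simp [hp])]
      subst hp
      rw [PySem.Dict.get?_setdefault_self]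
      cases hd : d.get? p.2 <;> simp
    · rw [List.find?_cons_of_neg (by simp [hp])]
      rw [PySem.Dict.get?_setdefault_of_ne _ _ (Ne.symm hp)]

theorem find?_enumerate_sorted (v : Int) :
    ∀ (l : List Int) (s : Int), l.Pairwise (· ≤ ·) → v ∈ l →
      (PySem.List.enumerate l s).find? (fun p => p.2 == v) =
        some (s + (l.countP (fun x => decide (x < v)) : Int), v) := by

  intro l
  induction l with
  | nil => intro s _ h; cases h
  | cons a t ih =>
    intro s hp hm
    obtain ⟨hat, hpt⟩ := List.pairwise_cons.mp hp
    rw [PySem.List.enumerate_cons]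
    by_cases hv : a = v
    · subst hv
      rw [List.find?_cons_of_pos (by simp)]
      have hz : t.countP (fun x => decide (x < a)) = 0 := by
        rw [List.countP_eq_zero]
        intro x hx
        have := hat x hx
        simp
        omega
      simp [hz]
    · rw [List.find?_cons_of_neg (by simp [hv])]
      have hmt : v ∈ t := by
        rcases List.mem_cons.mp hm with h | h
        · exact absurd h.symm hv
        · exact h
      rw [ih (s + 1) hpt hmt]
      have hav : a < v := lt_of_le_of_ne (hat v hmt) hv
      have hc : (a :: t).countP (fun x => decide (x < v)) = t.countP (fun x => decide (x < v)) + 1 := by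
        simp [hav]
      rw [hc]
      have he : s + 1 + (t.countP (fun x => decide (x < v)) : Int)
          = s + ((t.countP (fun x => decide (x < v)) + 1 : Nat) : Int) := by
        push_cast
        ring
      rw [he]

theorem pvRank_getD (skills : List Int) (v : Int) (hv : v ∈ skills) :
    (pvRank skills).getD v 0 = (skills.countP (fun x => decide (x < v)) : Int) := by

  unfold pvRank
  have hget := foldl_setdefault_get?
    (PySem.List.enumerate (PySem.List.sorted skills (fun x => x) false)) v PySem.Dict.empty
  have hp : (PySem.List.sorted skills (fun x => x) false).Pairwise (· ≤ ·) := by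
    simpa using PySem.List.sorted_pairwise skills (fun x => x)
  have hms : v ∈ PySem.List.sorted skills (fun x => x) false :=
    (PySem.List.mem_sorted _ _ _ _).mpr hv
  rw [find?_enumerate_sorted v _ 0 hp hms] at hget
  have hcp : (PySem.List.sorted skills (fun x => x) false).countP (fun x => decide (x < v))
      = skills.countP (fun x => decide (x < v)) :=
    (PySem.List.sorted_perm skills (fun x => x) false).countP_eq _
  rw [PySem.Dict.getD, hget]
  simp [hcp]

theorem count_partition (l : List Int) (u : Int) :
    l.countP (fun x => decide (x < u)) + l.count u + l.countP (fun x => decide (u < x)) = l.length := by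

  induction l with
  | nil => rfl
  | cons x l ih =>
    rcases lt_trichotomy x u with h | rfl | h
    · have h1 : decide (x < u) = true := by simp [h]
      have h2 : (x == u) = false := by simp; omega
      have h3 : decide (u < x) = false := by simp; omega
      simp only [List.countP_cons, List.count_cons, List.length_cons, h1, h2, h3]
      simp
      omega
    · have h1 : decide (x < x) = false := by simp
      have h2 : (x == x) = true := by simp
      simp only [List.countP_cons, List.count_cons, List.length_cons, h1, h2]
      simp
      omega
    · have h1 : decide (x < u) = false := by simp; omega
      have h2 : (x == u) = false := by simp; omega
      have h3 : decide (u < x) = true := by simp [h]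
      simp only [List.countP_cons, List.count_cons, List.length_cons, h1, h2, h3]
      simp
      omega

theorem pvS_eq_countP (skills : List Int) (ds : List Int) (u : Int)
    (hnd : ds.Nodup) (hmem : ∀ w, w ∈ ds ↔ w ∈ skills) :
    pvS skills ds u = (skills.countP (fun x => decide (u < x)) : Int) := by

  unfold pvS
  have hnd' : (ds.filter (fun w => decide (u < w))).Nodup := hnd.filter _
  set L := skills.filter (fun x => decide (u < x)) with hL
  have hfs : (ds.filter (fun w => decide (u < w))).toFinset = L.toFinset := by
    ext w
    simp only [List.mem_toFinset, List.mem_filter, hL]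
    rw [hmem w]
  calc ((ds.filter (fun w => decide (u < w))).map (fun w => (skills.count w : Int))).sum
      = ∑ w ∈ (ds.filter (fun w => decide (u < w))).toFinset, (skills.count w : Int) := by
        rw [List.sum_toFinset _ hnd']
    _ = ∑ w ∈ L.toFinset, (L.count w : Int) := by
        rw [hfs]
        refine Finset.sum_congr rfl ?_
        intro w hw
        have hwL : w ∈ L := List.mem_toFinset.mp hw
        have hpw : decide (u < w) = true := by
          rw [hL] at hwL
          exact (List.mem_filter.mp hwL).2
        rw [hL, List.count_filter (p := fun x => decide (u < x)) (a := w) hpw]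
    _ = (L.length : Int) := by
        norm_cast
        exact List.sum_toFinset_count_eq_length L
    _ = (skills.countP (fun x => decide (u < x)) : Int) := by
        rw [hL, List.countP_eq_length_filter]

theorem sweep (skills : List Int) (quarrels : List (Int × Int)) :
    ∀ (ds : List Int) (a0 : List Int) (t0 : Int),
      ds.Pairwise (· > ·) → a0.length = skills.length →
      (ds.foldl (pvStep skills quarrels) (a0, t0)).1.length = skills.length ∧
      ∀ (k : Nat) (hk : k < skills.length),
        (ds.foldl (pvStep skills quarrels) (a0, t0)).1[k]? =
          if skills[k] ∈ ds then
            some (max 0 (t0 - pvS skills ds skills[k] - (skills.count skills[k] : Int)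
                  - (pvQM skills quarrels).getD (k : Int) 0))
          else a0[k]? := by

  intro ds
  induction ds with
  | nil =>
    intro a0 t0 _ ha
    exact ⟨ha, by intro k hk; simp⟩
  | cons v tail ih =>
    intro a0 t0 hp ha
    obtain ⟨hvt, hpt⟩ := List.pairwise_cons.mp hp
    rw [List.foldl_cons]
    have hstep : pvStep skills quarrels (a0, t0) v =
        ((pvIdxs skills v).foldl (fun a i => PySem.List.pySetD a i
           (max 0 (t0 - (pvQM skills quarrels).getD i 0 - (skills.count v : Int)))) a0,
         t0 - (skills.count v : Int)) := by
      simp only [pvStep, pvSM_getD, pvIdxs_len]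
    rw [hstep]
    have hb : ∀ i ∈ pvIdxs skills v, 0 ≤ i ∧ i < ((a0.length : Nat) : Int) := by
      rw [ha]; exact pvIdxs_bounds skills v
    set a1 := (pvIdxs skills v).foldl (fun a i => PySem.List.pySetD a i
           (max 0 (t0 - (pvQM skills quarrels).getD i 0 - (skills.count v : Int)))) a0 with ha1def
    have ha1 : a1.length = skills.length := by
      rw [ha1def, foldl_setD_length _ _ _ hb, ha]
    obtain ⟨ihlen, ihget⟩ := ih a1 (t0 - (skills.count v : Int)) hpt ha1
    refine ⟨ihlen, ?_⟩
    intro k hk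
    rw [ihget k hk]
    by_cases hut : skills[k] ∈ tail
    · have huv : skills[k] < v := hvt _ hut
      have hin : skills[k] ∈ v :: tail := List.mem_cons_of_mem _ hut
      rw [if_pos hut, if_pos hin]
      have hS : pvS skills (v :: tail) skills[k] = (skills.count v : Int) + pvS skills tail skills[k] := by
        unfold pvS
        rw [List.filter_cons]
        simp [huv]
      rw [hS]
      congr 2
      ring
    · rw [if_neg hut, ha1def, foldl_setD_getElem? _ _ _ hb k]
      by_cases huv : skills[k] = v
      · have hkin : ((k : Int) ∈ pvIdxs skills v) := (pvIdxs_mem skills v k hk).mpr huv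
        have hin : skills[k] ∈ v :: tail := by rw [huv]; exact List.mem_cons_self
        rw [if_pos hkin, if_pos hin]
        have hS : pvS skills (v :: tail) skills[k] = 0 := by
          unfold pvS
          have : (v :: tail).filter (fun w => decide (skills[k] < w)) = [] := by
            rw [List.filter_eq_nil_iff]
            intro w hw
            rcases List.mem_cons.mp hw with rfl | hwt
            · simp [huv]
            · have := hvt w hwt
              simp
              omega
          rw [this]
          rfl
        rw [hS, huv]
        congr 2
        ring
      · have hknot : ((k : Int) ∉ pvIdxs skills v) := fun h => huv ((pvIdxs_mem skills v k hk).mp h)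
        have hnin : skills[k] ∉ v :: tail := by
          simp [List.mem_cons, huv, hut]
        rw [if_neg hknot, if_neg hnin]


-- ===== VERDICT (by name: the statement is the Claim_ definition above) =====
theorem solve_spec : Claim_equal_solve := by

  intro skills quarrels _ _
  unfold Spec_solve solve solve_alt
  set ds := PySem.List.sorted (PySem.Set.ofList skills) (fun x => x) true with hds
  have hmemds : ∀ w, w ∈ ds ↔ w ∈ skills := by
    intro w
    rw [hds, PySem.List.mem_sorted, PySem.Set.mem_ofList]
  have hnd : ds.Nodup := by
    rw [hds]
    exact (PySem.List.sorted_perm _ _ _).nodup_iff.mpr (PySem.Set.nodup_ofList skills)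
  have hge : ds.Pairwise (fun a b => b ≤ a) := by
    simpa [hds] using PySem.List.sorted_pairwise_rev (PySem.Set.ofList skills) (fun x => x)
  have hpd : ds.Pairwise (· > ·) := by
    refine (hge.and hnd).imp ?_
    rintro a b ⟨h1, h2⟩
    exact lt_of_le_of_ne h1 (Ne.symm h2)
  obtain ⟨hlen, hget⟩ := sweep skills quarrels ds (List.replicate skills.length 0)
    (skills.length : Int) hpd (by simp)
  apply List.ext_getElem?
  intro k
  by_cases hk : k < skills.length
  · rw [hget k hk]
    have hmem : skills[k] ∈ skills := List.getElem_mem hk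
    have hmemd : skills[k] ∈ ds := (hmemds _).mpr hmem
    rw [if_pos hmemd]
    rw [List.getElem?_map, PySem.List.getElem?_enumerate]
    rw [List.getElem?_eq_getElem hk]
    simp only [Option.map_some, zero_add]
    rw [pvRank_getD skills skills[k] hmem, ← pvQM_eq_pvQB]
    rw [pvS_eq_countP skills ds skills[k] hnd hmemds]
    have h6 := count_partition skills skills[k]
    congr 2
    omega
  · rw [List.getElem?_eq_none (by rw [hlen]; omega),
        List.getElem?_eq_none (by rw [List.length_map, PySem.List.length_enumerate]; omega)]
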